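-- pv_equiv track=rewrite | github.com/MrBrantCode/unitest_baseline | mut_generate/mist_train_cf/cf_27174/solution.py | calculate_waterway_lengths
-- ===== SOURCE A (Python) =====
-- def calculate_waterway_lengths(waterways):
--     waterway_lengths = {}
--     for name, length in waterways:
--         if name in waterway_lengths:
--             waterway_lengths[name] += length
--         else:
--             waterway_lengths[name] = length
--     return waterway_lengths
-- ===== SOURCE B (Python) =====
-- def calculate_waterway_lengths(waterways):
--     order = dict.fromkeys(name for name, _ in waterways)
--     return {name: sum(length for n, length in waterways if n == name)
--             for name in order}
-- ===== Notes on version B (the rewrite author's own statement) =====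
-- stated objective: simpler
-- what changed: Replaces A's streaming dict-accumulation loop by a two-pass comprehension: dedupe the names in first-occurrence order with dict.fromkeys, then sum each name's lengths with a generator expression.
import Mathlib
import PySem

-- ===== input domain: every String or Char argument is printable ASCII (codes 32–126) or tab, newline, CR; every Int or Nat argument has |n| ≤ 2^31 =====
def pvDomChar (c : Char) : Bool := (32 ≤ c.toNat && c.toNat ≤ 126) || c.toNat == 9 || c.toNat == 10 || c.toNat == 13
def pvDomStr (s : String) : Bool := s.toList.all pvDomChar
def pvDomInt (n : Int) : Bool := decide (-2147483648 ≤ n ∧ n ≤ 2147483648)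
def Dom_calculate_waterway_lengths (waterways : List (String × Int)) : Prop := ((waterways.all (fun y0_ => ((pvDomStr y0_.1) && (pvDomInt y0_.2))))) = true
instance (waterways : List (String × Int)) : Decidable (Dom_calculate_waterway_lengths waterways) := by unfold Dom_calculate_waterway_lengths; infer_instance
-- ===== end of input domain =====

-- B replaces A's single streaming dict-accumulation pass by a simpler two-pass
-- comprehension (dedupe names in first-occurrence order, then sum each name's lengths).

-- ===== PORT A =====
def calculate_waterway_lengths (waterways : List (String × Int)) : List (String × Int) :=
  (waterways.foldl
    (fun d p =>
      if d.contains p.1 then d.modify p.1 0 (· + p.2)   -- waterway_lengths[name] += length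
      else d.insert p.1 p.2)                            -- waterway_lengths[name] = length
    PySem.Dict.empty).items

-- ===== PORT B =====
def calculate_waterway_lengths_alt (waterways : List (String × Int)) : List (String × Int) :=
  (PySem.List.dedup (waterways.map (·.1))).map
    (fun name => (name, ((waterways.filter (fun p => p.1 == name)).map (·.2)).sum))

-- ===== PRECONDITION & SPEC =====
def Spec_calculate_waterway_lengths (waterways : List (String × Int)) (out : List (String × Int)) : Prop := out = calculate_waterway_lengths_alt waterways
instance (waterways : List (String × Int)) (out : List (String × Int)) : Decidable (Spec_calculate_waterway_lengths waterways out) := by unfold Spec_calculate_waterway_lengths; infer_instance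

-- ===== CLAIM (what is proved, stated in full; the proofs are below) =====
def Claim_equal_calculate_waterway_lengths : Prop := ∀ (waterways : List (String × Int)), Dom_calculate_waterway_lengths waterways → Spec_calculate_waterway_lengths waterways (calculate_waterway_lengths waterways)

-- ===== LEMMAS AND PROOFS =====

-- A's loop body
def pvStep (d : PySem.Dict String Int) (p : String × Int) : PySem.Dict String Int :=
  if d.contains p.1 then d.modify p.1 0 (· + p.2) else d.insert p.1 p.2

lemma keys_pvStep (d : PySem.Dict String Int) (p : String × Int) :
    (pvStep d p).keys = PySem.Set.add d.keys p.1 := by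
  unfold pvStep
  by_cases h : d.contains p.1 = true
  · rw [if_pos h, PySem.Dict.keys_modify, PySem.Dict.keys_insert_of_contains _ _ h]
    have hm : p.1 ∈ d.keys := by
      rw [PySem.Dict.contains_eq_decide_mem_keys] at h; simpa using h
    simp [PySem.Set.add, PySem.Set.contains, hm]
  · have h' : d.contains p.1 = false := by simpa using h
    rw [if_neg (by simp [h']), PySem.Dict.keys_insert_of_not_contains _ _ h']
    have hm : p.1 ∉ d.keys := by
      rw [PySem.Dict.contains_eq_decide_mem_keys] at h'; simpa using h'
    simp [PySem.Set.add, PySem.Set.contains, hm]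

lemma keys_foldl_pvStep (ws : List (String × Int)) :
    ∀ d : PySem.Dict String Int,
      (ws.foldl pvStep d).keys = PySem.Set.update d.keys (ws.map (·.1)) := by
  induction ws with
  | nil => intro d; simp [PySem.Set.update]
  | cons p t ih =>
    intro d
    simp only [List.foldl_cons, List.map_cons, ih, keys_pvStep, PySem.Set.update]

lemma nodup_keys_foldl_pvStep (ws : List (String × Int)) :
    ∀ d : PySem.Dict String Int, d.keys.Nodup → (ws.foldl pvStep d).keys.Nodup := by
  induction ws with
  | nil => intro d h; simpa using h
  | cons p t ih =>
    intro d h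
    apply ih
    rw [keys_pvStep]
    by_cases hm : p.1 ∈ d.keys
    · simpa [PySem.Set.add, PySem.Set.contains, hm] using h
    · simp only [PySem.Set.add, PySem.Set.contains]
      rw [if_neg (by simpa using hm)]
      refine List.Nodup.append h (List.nodup_singleton _) ?_
      simpa [List.disjoint_singleton] using hm

lemma getD_foldl_pvStep (ws : List (String × Int)) :
    ∀ (d : PySem.Dict String Int) (k : String),
      (ws.foldl pvStep d).getD k 0 =
        d.getD k 0 + ((ws.filter (fun p => p.1 == k)).map (·.2)).sum := by
  induction ws with
  | nil => intro d k; simp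
  | cons p t ih =>
    intro d k
    simp only [List.foldl_cons, ih]
    have hstep : (pvStep d p).getD k 0 = d.getD k 0 + (if p.1 = k then p.2 else 0) := by
      unfold pvStep
      by_cases hc : d.contains p.1 = true
      · rw [if_pos hc, PySem.Dict.getD_modify]
        by_cases hk : k = p.1
        · simp [hk]
        · rw [if_neg hk, if_neg (fun h => hk h.symm)]; omega
      · have h' : d.contains p.1 = false := by simpa using hc
        rw [if_neg (by simp [h']), PySem.Dict.getD_insert]
        by_cases hk : k = p.1
        · subst hk; simp [PySem.Dict.getD_of_not_contains _ _ h']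
        · rw [if_neg hk, if_neg (fun h => hk h.symm)]; omega
    by_cases hk : p.1 = k
    · simp [hstep, hk]; ring
    · simp [hstep, hk]

theorem calculate_waterway_lengths_eq (ws : List (String × Int)) :
    calculate_waterway_lengths ws = calculate_waterway_lengths_alt ws := by
  unfold calculate_waterway_lengths calculate_waterway_lengths_alt
  have hfold : ws.foldl
      (fun d p => if d.contains p.1 then d.modify p.1 0 (· + p.2) else d.insert p.1 p.2)
      PySem.Dict.empty = ws.foldl pvStep PySem.Dict.empty := rfl
  rw [hfold]
  have hnd : (ws.foldl pvStep PySem.Dict.empty).keys.Nodup :=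
    nodup_keys_foldl_pvStep ws _ (by simp)
  rw [PySem.Dict.items_eq_map_keys _ hnd (0 : Int)]
  rw [keys_foldl_pvStep]
  have hkeys : PySem.Set.update (PySem.Dict.empty : PySem.Dict String Int).keys (ws.map (·.1))
      = PySem.List.dedup (ws.map (·.1)) := by
    simp [PySem.Set.update_nil_left]
  rw [hkeys]
  apply List.map_congr_left
  intro name _
  rw [getD_foldl_pvStep]
  simp

-- ===== VERDICT (by name: the statement is the Claim_ definition above) =====
theorem calculate_waterway_lengths_spec : Claim_equal_calculate_waterway_lengths := by
  intro ws _
  exact calculate_waterway_lengths_eq ws
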